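-- pv_equiv track=rewrite | github.com/YaoXinZhi/AD-LitPathoNet | src_for_DataProcess/COMPARTMENTS_GAWSCatalog_Process.py | get_highest_score_compartment
-- ===== SOURCE A (Python) =====
-- from collections import defaultdict
--
-- def get_highest_score_compartment(symbol_to_cc_set: dict):
--
--     symbol_to_highest_cc_set = defaultdict(set)
--     for symbol, cc_set in symbol_to_cc_set.items():
--         sort_cc_list = list(sorted(cc_set, key=lambda x: x[1], reverse=True))
--
--         # (cc, score)
--         highest_score = sort_cc_list[0][1]
--
--         new_cc_set = set()
--         for (compartment, score) in sort_cc_list: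
--             if score < highest_score:
--                 break
--             symbol_to_highest_cc_set[symbol].add(compartment)
--     return symbol_to_highest_cc_set
-- ===== SOURCE B (Python) =====
-- from collections import defaultdict
--
-- def get_highest_score_compartment(symbol_to_cc_set: dict):
--     # Per symbol: find the maximum score, then collect every
--     # compartment attaining it, without sorting.
--     symbol_to_highest_cc_set = defaultdict(set)
--     for symbol, cc_set in symbol_to_cc_set.items():
--         highest_score = max(score for _, score in cc_set)
--         symbol_to_highest_cc_set[symbol] |= {
--             compartment for compartment, score in cc_set if score == highest_score
--         }
--     return symbol_to_highest_cc_set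
-- ===== Notes on version B (the rewrite author's own statement) =====
-- stated objective: alternative
-- what changed: B replaces A's per-symbol descending sort followed by a break-on-first-drop scan with a max-then-filter scan of the unsorted list (find the maximum score, collect all compartments attaining it).
import Mathlib
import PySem

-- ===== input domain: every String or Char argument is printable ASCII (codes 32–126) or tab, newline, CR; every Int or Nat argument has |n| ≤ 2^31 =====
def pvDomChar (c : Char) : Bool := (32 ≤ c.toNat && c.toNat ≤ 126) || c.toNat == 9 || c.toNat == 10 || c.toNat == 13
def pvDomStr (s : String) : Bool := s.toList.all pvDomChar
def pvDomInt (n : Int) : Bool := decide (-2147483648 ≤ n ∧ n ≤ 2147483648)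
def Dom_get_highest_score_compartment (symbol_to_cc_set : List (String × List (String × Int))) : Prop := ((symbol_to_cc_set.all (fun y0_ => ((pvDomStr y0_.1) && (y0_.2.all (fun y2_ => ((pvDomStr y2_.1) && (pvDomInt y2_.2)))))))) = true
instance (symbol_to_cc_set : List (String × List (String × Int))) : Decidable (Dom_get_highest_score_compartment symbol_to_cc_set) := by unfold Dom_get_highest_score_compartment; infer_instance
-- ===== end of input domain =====

-- B replaces A's per-symbol descending sort by a max-then-filter scan of the unsorted list (equal return value proved below).

-- ===== PORT A =====
-- the 'for (compartment, score) in sort_cc_list: if score < highest_score: break; ….add(compartment)' loop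
def ghscLoopA (symbol : String) (highest_score : Int)
    (d : PySem.Dict String (PySem.Set String)) :
    List (String × Int) → PySem.Dict String (PySem.Set String)
  | [] => d
  | cs :: rest =>
    if cs.2 < highest_score then d
    else ghscLoopA symbol highest_score
      (d.insert symbol (PySem.Set.add (d.getD symbol PySem.Set.empty) cs.1)) rest

def get_highest_score_compartment (symbol_to_cc_set : List (String × List (String × Int))) : List (String × List String) :=
  (symbol_to_cc_set.foldl (fun d p =>
      let sort_cc_list := PySem.List.sorted p.2 (fun x => x.2) true
      match sort_cc_list with
      | [] => d   -- sort_cc_list[0][1] raises IndexError here; excluded by Pre_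
      | hd :: tl =>
        let highest_score := hd.2   -- sort_cc_list[0][1]
        ghscLoopA p.1 highest_score d (hd :: tl))
    PySem.Dict.empty).items

-- ===== PORT B =====
def get_highest_score_compartment_alt (symbol_to_cc_set : List (String × List (String × Int))) : List (String × List String) :=
  (symbol_to_cc_set.foldl (fun d p =>
      -- max([score for _, score in cc_set]); none only for an empty cc_set (excluded by Pre_)
      let highest_score := (PySem.List.max? (p.2.map (fun x => x.2)) (fun s => s)).getD 0
      -- d[symbol] |= {compartment for compartment, score in cc_set if score == highest_score}
      d.insert p.1 (PySem.Set.union (d.getD p.1 PySem.Set.empty)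
        ((p.2.filter (fun x => x.2 == highest_score)).map (fun x => x.1))))
    PySem.Dict.empty).items

-- ===== PRECONDITION & SPEC =====
-- Pre_ excludes exactly the inputs with an empty cc_set, on which A raises IndexError at sort_cc_list[0].
def Pre_get_highest_score_compartment (symbol_to_cc_set : List (String × List (String × Int))) : Prop :=
  ∀ p ∈ symbol_to_cc_set, p.2 ≠ []
instance (symbol_to_cc_set : List (String × List (String × Int))) : Decidable (Pre_get_highest_score_compartment symbol_to_cc_set) := by unfold Pre_get_highest_score_compartment; infer_instance
def pvWitness_get_highest_score_compartment : (List (String × List (String × Int))) :=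
  [("APP", [("nucleus", 3), ("cytosol", 5), ("membrane", 5)]), ("TAU", [("axon", 1)])]

def Spec_get_highest_score_compartment (symbol_to_cc_set : List (String × List (String × Int))) (out : List (String × List String)) : Prop := out = get_highest_score_compartment_alt symbol_to_cc_set
instance (symbol_to_cc_set : List (String × List (String × Int))) (out : List (String × List String)) : Decidable (Spec_get_highest_score_compartment symbol_to_cc_set out) := by unfold Spec_get_highest_score_compartment; infer_instance

-- ===== CLAIM (what is proved, stated in full; the proofs are below) =====
def Claim_equal_get_highest_score_compartment : Prop := ∀ (symbol_to_cc_set : List (String × List (String × Int))), Dom_get_highest_score_compartment symbol_to_cc_set → Pre_get_highest_score_compartment symbol_to_cc_set → Spec_get_highest_score_compartment symbol_to_cc_set (get_highest_score_compartment symbol_to_cc_set)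

-- ===== LEMMAS AND PROOFS =====

-- A's break-loop collects exactly the longest prefix of scores ≥ highest_score.
theorem ghscLoopA_eq_takeWhile (symbol : String) (m : Int) :
    ∀ (l : List (String × Int)) (d : PySem.Dict String (PySem.Set String)),
      ghscLoopA symbol m d l =
        (l.takeWhile (fun y => !decide (y.2 < m))).foldl
          (fun d' (x : String × Int) =>
            d'.insert symbol (PySem.Set.add (d'.getD symbol PySem.Set.empty) x.1)) d := by
  intro l
  induction l with
  | nil => intro d; rfl
  | cons y ys ih =>
    intro d
    by_cases h : y.2 < m
    · simp [ghscLoopA, h]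
    · simp [ghscLoopA, h, ih]

-- stability of the insertion step: inserting x (key ≤ m) into a descending list of keys ≤ m
-- appends x to the maximal prefix iff x attains m, and leaves that prefix unchanged otherwise
theorem takeWhile_insertBy_max (m : Int) :
    ∀ (ds : List (String × Int)) (x : String × Int),
      List.Pairwise (fun a b : String × Int => b.2 ≤ a.2) ds →
      (∀ y ∈ ds, y.2 ≤ m) → x.2 ≤ m →
      (PySem.List.insertBy (fun a b : String × Int => decide (b.2 < a.2)) x ds).takeWhile
          (fun y => !decide (y.2 < m)) =
        ds.takeWhile (fun y => !decide (y.2 < m)) ++ (if x.2 < m then [] else [x]) := by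
  intro ds
  induction ds with
  | nil =>
    intro x _ _ hx
    by_cases h : x.2 < m <;> simp [PySem.List.insertBy, List.takeWhile, h]
  | cons y ys ih =>
    intro x hpw hmem hx
    by_cases hxy : y.2 < x.2
    · have hy : y.2 < m := lt_of_lt_of_le hxy hx
      by_cases hxm : x.2 < m <;>
        simp [PySem.List.insertBy, hxy, hy, hxm]
    · by_cases hy : y.2 < m
      · have hxm : x.2 < m := lt_of_le_of_lt (not_lt.mp hxy) hy
        simp [PySem.List.insertBy, hxy, hy, hxm]
      · have := ih x hpw.of_cons (fun z hz => hmem z (List.mem_cons_of_mem _ hz)) hx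
        simp [PySem.List.insertBy, hxy, hy, this]

-- stability of the whole reverse sort: the maximal-score prefix of the stable descending
-- sort is the filter of the original list, in original order
theorem takeWhile_sorted_rev (m : Int) (l : List (String × Int))
    (hmem : ∀ y ∈ l, y.2 ≤ m) :
    (PySem.List.sorted l (fun x => x.2) true).takeWhile (fun y => !decide (y.2 < m)) =
      l.filter (fun y => !decide (y.2 < m)) := by
  induction l using List.reverseRecOn with
  | nil => rfl
  | append_singleton l x ih =>
    have hl : ∀ y ∈ l, y.2 ≤ m := fun y hy => hmem y (by simp [hy])
    have hx : x.2 ≤ m := hmem x (by simp)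
    have hstep : PySem.List.sorted (l ++ [x]) (fun x => x.2) true =
        PySem.List.insertBy (fun a b : String × Int => decide (b.2 < a.2)) x
          (PySem.List.sorted l (fun x => x.2) true) := by
      rw [PySem.List.sorted_rev_eq_foldl_insertBy, PySem.List.sorted_rev_eq_foldl_insertBy,
        List.foldl_append]
      rfl
    rw [hstep,
      takeWhile_insertBy_max m _ x (PySem.List.sorted_pairwise_rev l (fun x => x.2))
        (fun y hy => hl y ((PySem.List.mem_sorted _ _ _ _).mp hy)) hx,
      ih hl, List.filter_append]
    by_cases hxm : x.2 < m <;> simp [hxm]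

-- folding A's per-compartment insert over a nonempty list is B's single union-insert
theorem foldl_insert_add_eq_insert_union (symbol : String) :
    ∀ (T : List (String × Int)) (d : PySem.Dict String (PySem.Set String)) (v : PySem.Set String),
      T.foldl (fun d' x => d'.insert symbol (PySem.Set.add (d'.getD symbol PySem.Set.empty) x.1))
          (d.insert symbol v) =
        d.insert symbol (T.foldl (fun s x => PySem.Set.add s x.1) v) := by
  intro T
  induction T with
  | nil => intro d v; rfl
  | cons c T ih =>
    intro d v
    simp only [List.foldl_cons, PySem.Dict.getD_insert_self, PySem.Dict.insert_insert_self]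
    exact ih d (PySem.Set.add v c.1)

-- the per-item step of A equals the per-item step of B (cc_set nonempty)
theorem ghsc_step_eq (d : PySem.Dict String (PySem.Set String))
    (p : String × List (String × Int)) (hne : p.2 ≠ []) :
    (match PySem.List.sorted p.2 (fun x => x.2) true with
     | [] => d
     | hd :: tl => ghscLoopA p.1 hd.2 d (hd :: tl)) =
      d.insert p.1 (PySem.Set.union (d.getD p.1 PySem.Set.empty)
        ((p.2.filter (fun x =>
            x.2 == (PySem.List.max? (p.2.map (fun x => x.2)) (fun s => s)).getD 0)).map
          (fun x => x.1))) := by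
  obtain ⟨hd, tl, hys⟩ : ∃ hd tl, PySem.List.sorted p.2 (fun x => x.2) true = hd :: tl := by
    rcases h : PySem.List.sorted p.2 (fun x => x.2) true with _ | ⟨hd, tl⟩
    · exact absurd ((PySem.List.sorted_eq_nil_iff _ _ _).mp h) hne
    · exact ⟨hd, tl, rfl⟩
  have hmax : ∀ y ∈ p.2, y.2 ≤ hd.2 := PySem.List.key_head_sorted_rev_ge p.2 _ hys
  -- B's highest_score is A's highest_score
  have hhd_mem : hd ∈ p.2 := (PySem.List.mem_sorted _ _ _ _).mp (by rw [hys]; exact List.mem_cons_self)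
  obtain ⟨v, hv⟩ : ∃ v, PySem.List.max? (p.2.map (fun x => x.2)) (fun s => s) = some v := by
    rcases h : PySem.List.max? (p.2.map (fun x => x.2)) (fun s => s) with _ | v
    · rw [PySem.List.max?_eq_none_iff, List.map_eq_nil_iff] at h; exact absurd h hne
    · exact ⟨v, h⟩
  have hveq : v = hd.2 := by
    have h1 : v ≤ hd.2 := by
      obtain ⟨y, hy, hyv⟩ := List.mem_map.mp (PySem.List.max?_mem hv)
      exact hyv ▸ hmax y hy
    have h2 : hd.2 ≤ v :=
      PySem.List.max?_isMax hv hd.2 (List.mem_map.mpr ⟨hd, hhd_mem, rfl⟩)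
    exact le_antisymm h1 h2
  rw [hys]
  show ghscLoopA p.1 hd.2 d (hd :: tl) = _
  rw [ghscLoopA_eq_takeWhile, ← hys, takeWhile_sorted_rev hd.2 p.2 hmax]
  -- the two filters agree on members of p.2
  have hfilter : p.2.filter (fun y => !decide (y.2 < hd.2)) =
      p.2.filter (fun x =>
        x.2 == (PySem.List.max? (p.2.map (fun x => x.2)) (fun s => s)).getD 0) := by
    refine List.filter_congr (fun y hy => ?_)
    have hle := hmax y hy
    rw [hv, hveq]
    simp only [Option.getD_some]
    by_cases h : y.2 = hd.2
    · simp [h]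
    · simp [h, lt_of_le_of_ne hle h]
  rw [hfilter]
  -- the filtered list is nonempty: it starts with the witness of the maximum; fold = union
  set L := p.2.filter (fun x =>
    x.2 == (PySem.List.max? (p.2.map (fun x => x.2)) (fun s => s)).getD 0) with hL
  rcases hLc : L with _ | ⟨a, T⟩
  · -- impossible: hd belongs to the filter
    exfalso
    have : hd ∈ L := by
      rw [hL]
      exact List.mem_filter.mpr ⟨hhd_mem, by rw [hv, hveq]; simp⟩
    rw [hLc] at this; simp at this
  · simp only [List.foldl_cons, List.map_cons]
    have hu : (d.getD p.1 PySem.Set.empty).union (a.1 :: T.map (fun x => x.1)) =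
        (T.map (fun x => x.1)).foldl PySem.Set.add
          (PySem.Set.add (d.getD p.1 PySem.Set.empty) a.1) := rfl
    rw [hu, List.foldl_map]
    exact foldl_insert_add_eq_insert_union p.1 T d
      (PySem.Set.add (d.getD p.1 PySem.Set.empty) a.1)

-- ===== VERDICT (by name: the statement is the Claim_ definition above) =====
theorem get_highest_score_compartment_spec : Claim_equal_get_highest_score_compartment := by
  intro xs _hdom hpre
  unfold Spec_get_highest_score_compartment get_highest_score_compartment get_highest_score_compartment_alt
  congr 1
  apply PySem.List.foldl_congr_mem
  intro d p hp
  exact ghsc_step_eq d p (hpre p hp)
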